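-- pv_equiv track=rewrite | github.com/JorgenWan/NestedNER | models/utils.py | calculate_length
-- ===== SOURCE A (Python) =====
-- def calculate_length(label_lists):
--     entity_len = []
--     for labels in label_lists:
--         seq_len = len(labels)
--
--         for i in range(seq_len):
--             if labels[i].startswith("B"):
--                 start = i
--
--                 j = start + 1
--                 while True:
--                     if j >= seq_len:
--                         end = j
--                         break
--                     if labels[j].startswith("E"):
--                         end = j
--                         break
--                     else:
--                         j += 1
--
--                 if end < seq_len:
--                     entity_len.append(end - start + 1)
--             if labels[i].startswith("S"):
--                 entity_len.append(1)
--     return entity_len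
-- ===== SOURCE B (Python) =====
-- def _seq_lengths(labels):
--     # one backward pass: carry the index of the nearest label starting with "E"
--     next_e = None
--     out = []
--     for i in range(len(labels) - 1, -1, -1):
--         lab = labels[i]
--         if lab.startswith("E"):
--             next_e = i
--         elif lab.startswith("B"):
--             if next_e is not None:
--                 out.append(next_e - i + 1)
--         elif lab.startswith("S"):
--             out.append(1)
--     out.reverse()
--     return out
--
-- def calculate_length(label_lists):
--     return [v for labels in label_lists for v in _seq_lengths(labels)]
-- ===== Notes on version B (the rewrite author's own statement) =====
-- stated objective: alternative
-- what changed: Replaces A's per-'B' forward scan for the next 'E' label by a single backward pass per sequence that carries the nearest-'E' index in a variable, resolving each 'B' in O(1); output is collected in reverse order and flipped once.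
import Mathlib
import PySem

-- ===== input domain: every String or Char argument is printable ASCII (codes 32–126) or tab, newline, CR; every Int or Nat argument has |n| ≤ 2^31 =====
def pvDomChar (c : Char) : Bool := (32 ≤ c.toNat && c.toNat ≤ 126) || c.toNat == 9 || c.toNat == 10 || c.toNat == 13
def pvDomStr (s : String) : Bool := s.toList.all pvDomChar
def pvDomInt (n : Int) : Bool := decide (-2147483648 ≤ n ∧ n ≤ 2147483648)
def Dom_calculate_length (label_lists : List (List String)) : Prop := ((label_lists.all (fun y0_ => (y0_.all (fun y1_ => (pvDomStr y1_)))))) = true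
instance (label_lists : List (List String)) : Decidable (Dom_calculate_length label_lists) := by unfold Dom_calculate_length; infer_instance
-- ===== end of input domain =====

-- B replaces A's per-"B" forward scan for the next "E" label by one backward pass per
-- sequence carrying the nearest-"E" index (objective: alternative).


-- ===== PORT A =====
-- A's inner `while True` loop: scan forward from j for the first label starting with "E";
-- returns seq_len if none (the loop's `j >= seq_len` break).
def pvFindE (labels : List String) (j : Nat) : Nat :=
  if h : labels.length ≤ j then j
  else if PySem.Str.startswith (labels.getD j "") "E" then j
  else pvFindE labels (j + 1)
termination_by labels.length - j

def calculate_length (label_lists : List (List String)) : List Int :=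
  label_lists.foldl
    (fun entity_len labels =>
      let seq_len := labels.length
      (List.range seq_len).foldl
        (fun entity_len i =>
          let entity_len :=
            if PySem.Str.startswith (labels.getD i "") "B" then
              let e := pvFindE labels (i + 1)
              if e < seq_len then entity_len ++ [((e : Int) - (i : Int) + 1)] else entity_len
            else entity_len
          if PySem.Str.startswith (labels.getD i "") "S" then entity_len ++ [(1 : Int)]
          else entity_len)
        entity_len)
    []

-- ===== PORT B =====
-- B's backward pass over one sequence: state = (nearest-"E" index seen so far, out);
-- Source B's `for i in range(len(labels)-1, -1, -1)` is the fold over (List.range n).reverse;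
-- out is appended to and reversed at the end, as in Source B.
def pvSeqLengths (labels : List String) : List Int :=
  let st :=
    (List.range labels.length).reverse.foldl
      (fun (st : Option Nat × List Int) i =>
        let lab := labels.getD i ""
        if PySem.Str.startswith lab "E" then (some i, st.2)
        else if PySem.Str.startswith lab "B" then
          match st.1 with
          | some e => (st.1, st.2 ++ [((e : Int) - (i : Int) + 1)])
          | none => st
        else if PySem.Str.startswith lab "S" then (st.1, st.2 ++ [(1 : Int)])
        else st)
      (none, [])
  st.2.reverse

def calculate_length_alt (label_lists : List (List String)) : List Int :=
  label_lists.flatMap pvSeqLengths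

-- ===== PRECONDITION & SPEC =====
def Spec_calculate_length (label_lists : List (List String)) (out : List Int) : Prop := out = calculate_length_alt label_lists
instance (label_lists : List (List String)) (out : List Int) : Decidable (Spec_calculate_length label_lists out) := by unfold Spec_calculate_length; infer_instance

-- ===== CLAIM (what is proved, stated in full; the proofs are below) =====
def Claim_equal_calculate_length : Prop := ∀ (label_lists : List (List String)), Dom_calculate_length label_lists → Spec_calculate_length label_lists (calculate_length label_lists)

-- ===== LEMMAS AND PROOFS =====

-- offset of the first "E"-label in a list, or its length if none
def pvFE : List String → Nat
  | [] => 0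
  | l :: ls => if PySem.Str.startswith l "E" then 0 else pvFE ls + 1

-- first "E"-label index ≥ k in labels, as an Option
def pvEFrom (labels : List String) (k : Nat) : Option Nat :=
  if pvFE (labels.drop k) < labels.length - k then some (k + pvFE (labels.drop k)) else none

-- per-index contribution of index i to the output (the common spec of both programs)
def pvG (labels : List String) (i : Nat) : List Int :=
  if PySem.Str.startswith (labels.getD i "") "B" then
    match pvEFrom labels (i + 1) with
    | some e => [((e : Int) - (i : Int) + 1)]
    | none => []
  else if PySem.Str.startswith (labels.getD i "") "S" then [(1 : Int)]
  else []

-- A's scan equals the spec on the dropped suffix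
theorem pvFindE_eq (labels : List String) (j : Nat) :
    pvFindE labels j = j + pvFE (labels.drop j) := by
  by_cases h : labels.length ≤ j
  · rw [pvFindE, dif_pos h, List.drop_eq_nil_of_le h]; simp [pvFE]
  · rw [pvFindE, dif_neg h]
    have hlt : j < labels.length := by omega
    have hd : labels.drop j = labels[j] :: labels.drop (j + 1) := List.drop_eq_getElem_cons hlt
    have hg : labels.getD j "" = labels[j] := List.getD_eq_getElem labels "" hlt
    rw [hg, hd]
    by_cases he : PySem.Str.startswith labels[j] "E" = true
    · rw [if_pos he]; simp only [pvFE, if_pos he]; omega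
    · rw [if_neg he]; simp only [pvFE, if_neg he]
      rw [pvFindE_eq labels (j + 1)]; omega
termination_by labels.length - j

-- "B","S","E" are pairwise exclusive one-character prefixes
theorem pvExcl (l : String) (c d : Char) (hcd : c ≠ d)
    (hc : PySem.Str.startswith l (String.ofList [c]) = true) :
    PySem.Str.startswith l (String.ofList [d]) = false := by
  by_contra h
  simp only [Bool.not_eq_false] at h
  rw [PySem.Str.startswith_eq, PySem.Chars.startswith_iff] at hc h
  rcases hc with ⟨t1, h1⟩
  rcases h with ⟨t2, h2⟩
  have e1 : (String.ofList [c]).toList = [c] := by simp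
  have e2 : (String.ofList [d]).toList = [d] := by simp
  rw [e1] at h1
  rw [e2] at h2
  rw [← h2] at h1
  simp at h1
  exact hcd h1.1

theorem pvBnotS (l : String) (hB : PySem.Str.startswith l "B" = true) :
    PySem.Str.startswith l "S" = false := pvExcl l 'B' 'S' (by decide) hB

theorem pvEnotB (l : String) (hE : PySem.Str.startswith l "E" = true) :
    PySem.Str.startswith l "B" = false := pvExcl l 'E' 'B' (by decide) hE

theorem pvEnotS (l : String) (hE : PySem.Str.startswith l "E" = true) :
    PySem.Str.startswith l "S" = false := pvExcl l 'E' 'S' (by decide) hE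

-- pvEFrom is unchanged across a non-"E" index
theorem pvEFrom_step (labels : List String) (j : Nat) (hj : j < labels.length)
    (hne : PySem.Str.startswith (labels.getD j "") "E" = false) :
    pvEFrom labels j = pvEFrom labels (j + 1) := by
  have hd : labels.drop j = labels[j] :: labels.drop (j + 1) := List.drop_eq_getElem_cons hj
  have hg : labels.getD j "" = labels[j] := List.getD_eq_getElem labels "" hj
  rw [hg] at hne
  unfold pvEFrom
  rw [hd]
  simp only [pvFE, hne, Bool.false_eq_true, if_false]
  by_cases h : pvFE (labels.drop (j + 1)) < labels.length - (j + 1)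
  · rw [if_pos h, if_pos (show pvFE (labels.drop (j + 1)) + 1 < labels.length - j by omega)]
    exact congrArg some (by omega)
  · rw [if_neg h, if_neg (show ¬ (pvFE (labels.drop (j + 1)) + 1 < labels.length - j) by omega)]

theorem pvEFrom_self (labels : List String) (j : Nat) (hj : j < labels.length)
    (he : PySem.Str.startswith (labels.getD j "") "E" = true) :
    pvEFrom labels j = some j := by
  have hd : labels.drop j = labels[j] :: labels.drop (j + 1) := List.drop_eq_getElem_cons hj
  have hg : labels.getD j "" = labels[j] := List.getD_eq_getElem labels "" hj
  rw [hg] at he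
  unfold pvEFrom
  rw [hd]
  simp only [pvFE, he, if_true]
  rw [if_pos (by omega)]
  exact congrArg some (by omega)

theorem pvEFrom_end (labels : List String) : pvEFrom labels labels.length = none := by
  unfold pvEFrom
  rw [List.drop_length]
  simp [pvFE]

-- B's backward fold, characterized: starting from (pvEFrom labels j, out) and processing
-- indices j-1 … 0, it ends in (pvEFrom labels 0, out ++ (outputs of [0,j) reversed)).
theorem pvFold_eq (labels : List String) (j : Nat) (hj : j ≤ labels.length) (out : List Int) :
    (List.range j).reverse.foldl
      (fun (st : Option Nat × List Int) i =>
        let lab := labels.getD i ""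
        if PySem.Str.startswith lab "E" then (some i, st.2)
        else if PySem.Str.startswith lab "B" then
          match st.1 with
          | some e => (st.1, st.2 ++ [((e : Int) - (i : Int) + 1)])
          | none => st
        else if PySem.Str.startswith lab "S" then (st.1, st.2 ++ [(1 : Int)])
        else st)
      (pvEFrom labels j, out)
    = (pvEFrom labels 0, out ++ ((List.range j).flatMap (pvG labels)).reverse) := by
  induction j generalizing out with
  | zero => simp
  | succ j ih =>
    have hjlt : j < labels.length := by omega
    rw [List.range_succ, List.reverse_append]
    simp only [List.reverse_singleton, List.singleton_append, List.foldl_cons]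
    rw [List.flatMap_append, List.flatMap_singleton, List.reverse_append]
    by_cases hE : PySem.Str.startswith (labels.getD j "") "E" = true
    · have h1 : pvG labels j = [] := by
        unfold pvG
        rw [pvEnotB _ hE, pvEnotS _ hE]
        simp
      have h2 : pvEFrom labels j = some j := pvEFrom_self labels j hjlt hE
      simp only [hE, if_true]
      rw [← h2]
      exact (ih (by omega) out).trans (by rw [h1]; simp)
    · have hne : PySem.Str.startswith (labels.getD j "") "E" = false := by
        simpa using hE
      have hstep : pvEFrom labels j = pvEFrom labels (j + 1) := pvEFrom_step labels j hjlt hne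
      by_cases hB : PySem.Str.startswith (labels.getD j "") "B" = true
      · have h1 : pvG labels j =
            (match pvEFrom labels (j + 1) with
             | some e => [((e : Int) - (j : Int) + 1)]
             | none => []) := by
          unfold pvG
          rw [hB]
          simp
        cases hm : pvEFrom labels (j + 1) with
        | some e =>
          simp only [hne, Bool.false_eq_true, if_false, hB, if_true]
          rw [← hstep.trans hm]
          exact (ih (by omega) (out ++ [((e : Int) - (j : Int) + 1)])).trans
            (by rw [h1, hm, ← hstep.trans hm, hstep, hm]; simp)
        | none =>
          simp only [hne, Bool.false_eq_true, if_false, hB, if_true]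
          rw [show (none : Option Nat) = pvEFrom labels j from (hstep.trans hm).symm]
          exact (ih (by omega) out).trans (by rw [h1, hm]; simp)
      · have hB' : PySem.Str.startswith (labels.getD j "") "B" = false := by
          simpa using hB
        by_cases hS : PySem.Str.startswith (labels.getD j "") "S" = true
        · have h1 : pvG labels j = [(1 : Int)] := by
            unfold pvG
            rw [hB', hS]
            simp
          simp only [hne, Bool.false_eq_true, if_false, hB', hS, if_true]
          rw [← hstep]
          exact (ih (by omega) (out ++ [(1 : Int)])).trans (by rw [h1]; simp)
        · have hS' : PySem.Str.startswith (labels.getD j "") "S" = false := by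
            simpa using hS
          have h1 : pvG labels j = [] := by
            unfold pvG
            rw [hB', hS']
            simp
          simp only [hne, Bool.false_eq_true, if_false, hB', hS']
          rw [← hstep]
          exact (ih (by omega) out).trans (by rw [h1]; simp)

-- B's per-sequence result is the flatMap of the per-index contributions
theorem pvSeqLengths_eq (labels : List String) :
    pvSeqLengths labels = (List.range labels.length).flatMap (pvG labels) := by
  unfold pvSeqLengths
  rw [show ((none : Option Nat), ([] : List Int)) = (pvEFrom labels labels.length, ([] : List Int)) by rw [pvEFrom_end]]
  rw [pvFold_eq labels labels.length (le_refl _) []]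
  simp

-- A's inner step equals appending the per-index contribution
theorem pvAStep_eq (labels : List String) (acc : List Int) (i : Nat) (hi : i < labels.length) :
    (let entity_len :=
        if PySem.Str.startswith (labels.getD i "") "B" then
          let e := pvFindE labels (i + 1)
          if e < labels.length then acc ++ [((e : Int) - (i : Int) + 1)] else acc
        else acc
      if PySem.Str.startswith (labels.getD i "") "S" then entity_len ++ [(1 : Int)]
      else entity_len)
    = acc ++ pvG labels i := by
  by_cases hB : PySem.Str.startswith (labels.getD i "") "B" = true
  · have hS := pvBnotS _ hB
    have he : pvFindE labels (i + 1) = (i + 1) + pvFE (labels.drop (i + 1)) :=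
      pvFindE_eq labels (i + 1)
    unfold pvG
    by_cases hlt : pvFE (labels.drop (i + 1)) < labels.length - (i + 1)
    · have hm : pvEFrom labels (i + 1) = some ((i + 1) + pvFE (labels.drop (i + 1))) := by
        unfold pvEFrom
        rw [if_pos hlt]
      simp only [hB, if_true, hS, Bool.false_eq_true, if_false, he, hm]
      rw [if_pos (by omega)]
    · have hm : pvEFrom labels (i + 1) = none := by
        unfold pvEFrom
        rw [if_neg hlt]
      simp only [hB, if_true, hS, Bool.false_eq_true, if_false, he, hm]
      rw [if_neg (by omega)]
      simp
  · have hB' : PySem.Str.startswith (labels.getD i "") "B" = false := by simpa using hB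
    unfold pvG
    by_cases hS : PySem.Str.startswith (labels.getD i "") "S" = true
    · simp only [hB', Bool.false_eq_true, if_false, hS, if_true]
    · have hS' : PySem.Str.startswith (labels.getD i "") "S" = false := by simpa using hS
      simp only [hB', Bool.false_eq_true, if_false, hS']
      simp

-- A's inner loop over one sequence equals appending B's per-sequence result
theorem pvInner_eq (labels : List String) (acc : List Int) :
    (List.range labels.length).foldl
        (fun entity_len i =>
          let entity_len :=
            if PySem.Str.startswith (labels.getD i "") "B" then
              let e := pvFindE labels (i + 1)
              if e < labels.length then entity_len ++ [((e : Int) - (i : Int) + 1)] else entity_len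
            else entity_len
          if PySem.Str.startswith (labels.getD i "") "S" then entity_len ++ [(1 : Int)]
          else entity_len) acc
    = acc ++ pvSeqLengths labels := by
  rw [pvSeqLengths_eq]
  refine Eq.trans ?_ (PySem.List.foldl_append_eq_flatMap _ _ _)
  apply PySem.List.foldl_congr_mem
  intro a i hi
  exact pvAStep_eq labels a i (List.mem_range.mp hi)

-- ===== VERDICT (by name: the statement is the Claim_ definition above) =====
theorem calculate_length_spec : Claim_equal_calculate_length := by
  intro label_lists hdom
  clear hdom
  unfold Spec_calculate_length calculate_length calculate_length_alt
  induction label_lists using List.reverseRecOn with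
  | nil => rfl
  | append_singleton ll labels ih =>
    rw [List.foldl_append, List.flatMap_append, List.foldl_cons, List.foldl_nil, ih,
      List.flatMap_singleton]
    exact pvInner_eq labels _
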